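-- pv_equiv track=rewrite | github.com/dorko-dorkus/loto | loto/scheduling/roster_input.py | resource_caps_timeline
-- ===== SOURCE A (Python) =====
-- from collections import defaultdict
-- from typing import Callable, Iterable, Mapping, Sequence
--
-- Interval = tuple[int, int]
--
-- def resource_caps_timeline(
--     roster: Mapping[str, Iterable[Interval]],
-- ) -> dict[int, dict[str, int]]:
--     """Construct a time-indexed resource capacity timeline.
--
--     The returned mapping associates each integer time with a mapping of hat name
--     to the number of available workers wearing that hat.
--     """
--
--     timeline: dict[int, dict[str, int]] = defaultdict(lambda: defaultdict(int))
--     for hat, intervals in roster.items():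
--         for start, stop in intervals:
--             for t in range(start, stop):
--                 timeline[t][hat] = timeline[t].get(hat, 0) + 1
--     # convert nested defaultdicts to normal dicts
--     return {t: dict(caps) for t, caps in timeline.items()}
-- ===== SOURCE B (Python) =====
-- def resource_caps_timeline(roster):
--     """Two-phase rewrite: first collect the covered times once (dict.fromkeys keeps
--     first-occurrence order), then compute each time's capacities directly by
--     counting the intervals that cover it -- no incremental per-time tallies."""
--     times = dict.fromkeys(
--         t
--         for _, intervals in roster.items()
--         for start, stop in intervals
--         for t in range(start, stop)
--     )
--     timeline = {}
--     for t in times: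
--         caps = {}
--         for hat, intervals in roster.items():
--             cover = sum(1 for start, stop in intervals if start <= t < stop)
--             if cover:
--                 caps[hat] = caps.get(hat, 0) + cover
--         timeline[t] = caps
--     return timeline
-- ===== Notes on version B (the rewrite author's own statement) =====
-- stated objective: alternative
-- what changed: A makes one incremental pass, bumping nested per-time tallies timeline[t][hat] for every covered time unit of every interval; B instead collects the covered times once with dict.fromkeys and then, for each time, computes the capacities directly by counting the intervals that cover it (a stabbing-count query), with no running tallies at all.
import Mathlib
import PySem

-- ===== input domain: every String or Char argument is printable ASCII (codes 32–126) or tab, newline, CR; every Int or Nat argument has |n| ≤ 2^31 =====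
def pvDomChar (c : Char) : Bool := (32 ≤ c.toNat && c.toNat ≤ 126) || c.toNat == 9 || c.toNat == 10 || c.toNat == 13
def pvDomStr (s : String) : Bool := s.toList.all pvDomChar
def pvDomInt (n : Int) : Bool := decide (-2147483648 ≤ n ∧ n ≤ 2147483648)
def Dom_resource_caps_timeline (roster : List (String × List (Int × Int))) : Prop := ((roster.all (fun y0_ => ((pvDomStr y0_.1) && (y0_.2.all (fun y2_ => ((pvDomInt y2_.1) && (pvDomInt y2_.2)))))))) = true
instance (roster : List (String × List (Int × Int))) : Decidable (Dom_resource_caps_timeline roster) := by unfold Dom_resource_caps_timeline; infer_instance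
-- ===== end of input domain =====

-- B replaces A's incremental per-time-unit nested tallies by a two-phase plan:
-- dedup of the covered times, then a direct interval-coverage count per (time, hat).

-- ===== PORT A =====
-- triple loop mutating timeline[t][hat]; the defaultdict access-then-assign is ported as
-- insert of the updated inner dict at t (overwrite keeps position, new keys append —
-- exactly Python dict assignment); the final dict() conversion is the items map.
def resource_caps_timeline (roster : List (String × List (Int × Int))) : List (Int × List (String × Int)) :=
  let timeline : PySem.Dict Int (PySem.Dict String Int) :=
    roster.foldl (fun tl hp =>
      hp.2.foldl (fun tl iv =>
        (PySem.List.pyRange iv.1 iv.2 1).foldl (fun tl t =>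
          let inner := tl.getD t PySem.Dict.empty
          tl.insert t (inner.insert hp.1 (inner.getD hp.1 0 + 1))) tl) tl) PySem.Dict.empty
  -- {t: dict(caps) for t, caps in timeline.items()}
  timeline.items.map (fun p => (p.1, p.2.items))

-- ===== PORT B =====
-- cover = sum(1 for start, stop in intervals if start <= t < stop)
def pvCover (intervals : List (Int × Int)) (t : Int) : Int :=
  intervals.foldl (fun acc iv => if iv.1 ≤ t ∧ t < iv.2 then acc + 1 else acc) 0

-- dict.fromkeys(generator) = ordered dedup (PySem.List.dedup); then per-time direct counts
def resource_caps_timeline_alt (roster : List (String × List (Int × Int))) : List (Int × List (String × Int)) :=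
  let times : List Int :=
    PySem.List.dedup (roster.flatMap (fun hp => hp.2.flatMap (fun iv => PySem.List.pyRange iv.1 iv.2 1)))
  let timeline : PySem.Dict Int (List (String × Int)) :=
    times.foldl (fun tl t =>
      let caps : PySem.Dict String Int :=
        roster.foldl (fun caps hp =>
          let cover := pvCover hp.2 t
          if cover ≠ 0 then caps.insert hp.1 (caps.getD hp.1 0 + cover) else caps) PySem.Dict.empty
      tl.insert t caps.items) PySem.Dict.empty
  timeline.items

-- ===== PRECONDITION & SPEC =====
def Spec_resource_caps_timeline (roster : List (String × List (Int × Int))) (out : List (Int × List (String × Int))) : Prop := out = resource_caps_timeline_alt roster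
instance (roster : List (String × List (Int × Int))) (out : List (Int × List (String × Int))) : Decidable (Spec_resource_caps_timeline roster out) := by unfold Spec_resource_caps_timeline; infer_instance

-- ===== CLAIM (what is proved, stated in full; the proofs are below) =====
def Claim_equal_resource_caps_timeline : Prop := ∀ (roster : List (String × List (Int × Int))), Dom_resource_caps_timeline roster → Spec_resource_caps_timeline roster (resource_caps_timeline roster)

-- ===== LEMMAS AND PROOFS =====

-- A's per-event nested increment, as a step over flat (time, hat) events
def pvStepA (tl : PySem.Dict Int (PySem.Dict String Int)) (e : Int × String) : PySem.Dict Int (PySem.Dict String Int) :=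
  let inner := tl.getD e.1 PySem.Dict.empty
  tl.insert e.1 (inner.insert e.2 (inner.getD e.2 0 + 1))

-- the flat event list A's triple loop walks, entry by entry
def pvEntryEvents (hp : String × List (Int × Int)) : List (Int × String) :=
  hp.2.flatMap (fun iv => (PySem.List.pyRange iv.1 iv.2 1).map (fun t => (t, hp.1)))

-- covering-interval count of one entry (Nat form of pvCover)
def pvCnt (hp : String × List (Int × Int)) (t : Int) : Nat :=
  hp.2.countP (fun iv => decide (iv.1 ≤ t ∧ t < iv.2))

-- "bump hat h by n" on an inner tally dict (the effect of n increments at slot t)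
def pvF (n : Nat) (h : String) (s : PySem.Dict String Int) : PySem.Dict String Int :=
  if n = 0 then s else s.insert h (s.getD h 0 + (n : Int))

-- A's triple loop is the flat event fold
theorem pvReshape (roster : List (String × List (Int × Int))) :
    roster.foldl (fun tl hp =>
      hp.2.foldl (fun tl iv =>
        (PySem.List.pyRange iv.1 iv.2 1).foldl (fun tl t =>
          let inner := tl.getD t PySem.Dict.empty
          tl.insert t (inner.insert hp.1 (inner.getD hp.1 0 + 1))) tl) tl) PySem.Dict.empty
    = (roster.flatMap pvEntryEvents).foldl pvStepA PySem.Dict.empty := by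
  rw [List.foldl_flatMap]
  apply PySem.List.foldl_congr_mem
  intro tl hp _
  unfold pvEntryEvents
  rw [List.foldl_flatMap]
  apply PySem.List.foldl_congr_mem
  intro tl' iv _
  rw [List.foldl_map]
  rfl

theorem pvF_comp (n m : Nat) (h : String) (s : PySem.Dict String Int) :
    pvF n h (pvF m h s) = pvF (m + n) h s := by
  unfold pvF
  by_cases hm : m = 0
  · simp [hm]
  · by_cases hn : n = 0
    · simp [hn, hm]
    · rw [if_neg hm, if_neg hn, if_neg (by omega),
          PySem.Dict.getD_insert_self, PySem.Dict.insert_insert_self]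
      congr 1
      push_cast
      ring

-- slot t of the event fold over constant-hat events: bump by the number of hits at t
theorem pvSlotMap (us : List Int) (h : String) (t : Int) :
    ∀ d : PySem.Dict Int (PySem.Dict String Int),
    ((us.map (fun u => (u, h))).foldl pvStepA d).getD t PySem.Dict.empty
      = pvF (us.count t) h (d.getD t PySem.Dict.empty) := by
  induction us with
  | nil => intro d; simp [pvF]
  | cons u us ih =>
    intro d
    simp only [List.map_cons, List.foldl_cons]
    rw [ih (pvStepA d (u, h))]
    by_cases hu : u = t
    · subst hu
      have hslot : (pvStepA d (u, h)).getD u PySem.Dict.empty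
          = pvF 1 h (d.getD u PySem.Dict.empty) := by
        simp [pvStepA, pvF, PySem.Dict.getD_insert_self]
      rw [hslot, pvF_comp, List.count_cons_self, Nat.add_comm]
    · have hslot : (pvStepA d (u, h)).getD t PySem.Dict.empty
          = d.getD t PySem.Dict.empty := by
        simp only [pvStepA]
        exact PySem.Dict.getD_insert_of_ne _ _ _ (fun hh => hu hh.symm)
      rw [hslot]
      simp [hu]

-- hits of t among an entry's flattened ranges = covering-interval count
theorem pvCountFlat (ivs : List (Int × Int)) (t : Int) :
    (ivs.flatMap (fun iv => PySem.List.pyRange iv.1 iv.2 1)).count t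
      = ivs.countP (fun iv => decide (iv.1 ≤ t ∧ t < iv.2)) := by
  induction ivs with
  | nil => simp
  | cons iv rest ih =>
    rw [List.flatMap_cons, List.count_append, ih, List.countP_cons]
    have : (PySem.List.pyRange iv.1 iv.2 1).count t
        = if iv.1 ≤ t ∧ t < iv.2 then 1 else 0 := by
      by_cases hc : iv.1 ≤ t ∧ t < iv.2
      · rw [if_pos hc]
        exact List.count_eq_one_of_mem (PySem.List.nodup_pyRange_one _ _)
          ((PySem.List.mem_pyRange_one).mpr hc)
      · rw [if_neg hc, List.count_eq_zero_of_not_mem]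
        intro hm
        exact hc ((PySem.List.mem_pyRange_one).mp hm)
    rw [this]
    by_cases hc : iv.1 ≤ t ∧ t < iv.2
    · simp [hc]
      omega
    · simp [hc]

-- slot t after one roster entry's events: bump its hat by its covering count
theorem pvSlotEntry (hp : String × List (Int × Int)) (t : Int)
    (d : PySem.Dict Int (PySem.Dict String Int)) :
    ((pvEntryEvents hp).foldl pvStepA d).getD t PySem.Dict.empty
      = pvF (pvCnt hp t) hp.1 (d.getD t PySem.Dict.empty) := by
  have he : pvEntryEvents hp
      = (hp.2.flatMap (fun iv => PySem.List.pyRange iv.1 iv.2 1)).map (fun u => (u, hp.1)) := by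
    unfold pvEntryEvents
    rw [List.map_flatMap]
  rw [he, pvSlotMap, pvCountFlat]
  rfl

-- slot t after the whole event stream = the per-entry bump fold over roster
theorem pvSlotMain (roster : List (String × List (Int × Int))) (t : Int) :
    ∀ d : PySem.Dict Int (PySem.Dict String Int),
    ((roster.flatMap pvEntryEvents).foldl pvStepA d).getD t PySem.Dict.empty
      = roster.foldl (fun s hp => pvF (pvCnt hp t) hp.1 s) (d.getD t PySem.Dict.empty) := by
  induction roster with
  | nil => intro d; simp
  | cons hp rest ih =>
    intro d
    rw [List.flatMap_cons, List.foldl_append, List.foldl_cons, ih, pvSlotEntry]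

-- B's inner caps loop is that bump fold
theorem pvInnerB (roster : List (String × List (Int × Int))) (t : Int)
    (s : PySem.Dict String Int) :
    roster.foldl (fun caps hp =>
        let cover := pvCover hp.2 t
        if cover ≠ 0 then caps.insert hp.1 (caps.getD hp.1 0 + cover) else caps) s
      = roster.foldl (fun s hp => pvF (pvCnt hp t) hp.1 s) s := by
  apply PySem.List.foldl_congr_mem
  intro caps hp _
  have hcov : pvCover hp.2 t = (pvCnt hp t : Int) := by
    unfold pvCover pvCnt
    rw [PySem.List.foldl_ite_add_one]
    simp
  simp only [hcov, pvF]
  by_cases hz : pvCnt hp t = 0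
  · simp [hz]
  · simp [hz, Int.natCast_eq_zero]

-- the flat times B dedups are the event stream's times
theorem pvTimes (roster : List (String × List (Int × Int))) :
    roster.flatMap (fun hp => hp.2.flatMap (fun iv => PySem.List.pyRange iv.1 iv.2 1))
      = (roster.flatMap pvEntryEvents).map Prod.fst := by
  rw [List.map_flatMap]
  congr 1
  funext hp
  unfold pvEntryEvents
  rw [List.map_flatMap]
  congr 1
  funext iv
  rw [List.map_map]
  exact (List.map_id _).symm

-- the common normal form both programs reach
def pvCanon (roster : List (String × List (Int × Int))) : List (Int × List (String × Int)) :=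
  (PySem.Set.ofList ((roster.flatMap pvEntryEvents).map Prod.fst)).map (fun t =>
    (t, (roster.foldl (fun s hp => pvF (pvCnt hp t) hp.1 s) PySem.Dict.empty).items))

theorem pvA_canon (roster : List (String × List (Int × Int))) :
    resource_caps_timeline roster = pvCanon roster := by
  show ((roster.foldl (fun tl hp =>
      hp.2.foldl (fun tl iv =>
        (PySem.List.pyRange iv.1 iv.2 1).foldl (fun tl t =>
          let inner := tl.getD t PySem.Dict.empty
          tl.insert t (inner.insert hp.1 (inner.getD hp.1 0 + 1))) tl) tl) PySem.Dict.empty).items.map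
      (fun p => (p.1, p.2.items))) = pvCanon roster
  rw [pvReshape]
  have hkeys : ((roster.flatMap pvEntryEvents).foldl pvStepA PySem.Dict.empty).keys
      = PySem.Set.ofList ((roster.flatMap pvEntryEvents).map Prod.fst) := by
    simpa [PySem.Dict.keys_empty, PySem.Set.update_nil_left] using
      PySem.Dict.keys_foldl_insert_key (l := roster.flatMap pvEntryEvents)
        (key := Prod.fst)
        (f := fun tl (e : Int × String) =>
          (tl.getD e.1 PySem.Dict.empty).insert e.2 ((tl.getD e.1 PySem.Dict.empty).getD e.2 0 + 1))
        (d := PySem.Dict.empty)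
  have hnd : ((roster.flatMap pvEntryEvents).foldl pvStepA PySem.Dict.empty).keys.Nodup := by
    rw [hkeys]; exact PySem.Set.nodup_ofList _
  rw [PySem.Dict.items_eq_map_keys _ hnd PySem.Dict.empty, List.map_map, hkeys]
  unfold pvCanon
  apply List.map_congr_left
  intro t _
  have hslot := pvSlotMain roster t PySem.Dict.empty
  simp only [Function.comp]
  rw [hslot]
  simp [PySem.Dict.getD_empty]

theorem pvB_canon (roster : List (String × List (Int × Int))) :
    resource_caps_timeline_alt roster = pvCanon roster := by
  show ((PySem.List.dedup (roster.flatMap (fun hp => hp.2.flatMap (fun iv => PySem.List.pyRange iv.1 iv.2 1)))).foldl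
      (fun tl t =>
        tl.insert t ((roster.foldl (fun caps hp =>
          let cover := pvCover hp.2 t
          if cover ≠ 0 then caps.insert hp.1 (caps.getD hp.1 0 + cover) else caps)
            PySem.Dict.empty).items)) PySem.Dict.empty).items = pvCanon roster
  rw [pvTimes, PySem.List.dedup_eq_ofList]
  have h2 : ((PySem.Set.ofList ((roster.flatMap pvEntryEvents).map Prod.fst)).foldl
      (fun tl t =>
        tl.insert t ((roster.foldl (fun caps hp =>
          let cover := pvCover hp.2 t
          if cover ≠ 0 then caps.insert hp.1 (caps.getD hp.1 0 + cover) else caps)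
            PySem.Dict.empty).items)) PySem.Dict.empty).items
      = (PySem.Set.ofList ((roster.flatMap pvEntryEvents).map Prod.fst)).map (fun t =>
          (t, (roster.foldl (fun caps hp =>
            let cover := pvCover hp.2 t
            if cover ≠ 0 then caps.insert hp.1 (caps.getD hp.1 0 + cover) else caps)
              PySem.Dict.empty).items)) := by
    simpa using PySem.Dict.items_foldl_insert_fresh
      (l := PySem.Set.ofList ((roster.flatMap pvEntryEvents).map Prod.fst))
      (k := fun t => t)
      (v := fun t => ((roster.foldl (fun caps hp =>
          let cover := pvCover hp.2 t
          if cover ≠ 0 then caps.insert hp.1 (caps.getD hp.1 0 + cover) else caps)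
            PySem.Dict.empty).items))
      (d := PySem.Dict.empty)
      (fun a _ => by simp)
      (by simp)
  rw [h2]
  unfold pvCanon
  apply List.map_congr_left
  intro t _
  rw [pvInnerB roster t PySem.Dict.empty]

-- ===== VERDICT (by name: the statement is the Claim_ definition above) =====
theorem resource_caps_timeline_spec : Claim_equal_resource_caps_timeline := by
  intro roster _
  show resource_caps_timeline roster = resource_caps_timeline_alt roster
  rw [pvA_canon, pvB_canon]
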